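-- pv_equiv track=rewrite | github.com/Fondamenti18/fondamenti-di-programmazione | students/1753339/homework04/program01.py | trova_nodi
-- ===== SOURCE A (Python) =====
-- def trova_nodi(diz,x,ris):
--     '''Trova i nodi del sottoalbero radicato in x'''
--     while x in diz.keys():
--         ris[x] = diz[x]
--         if ris[x] == []:
--             break
--         for el in ris[x]:
--             x = el
--             ris = trova_nodi(diz,x,ris)
--     return ris
-- ===== SOURCE B (Python) =====
-- def trova_nodi(diz, x, ris):
--     '''Trova i nodi del sottoalbero radicato in x'''
--     stack = [x]
--     seen = set()
--     while stack:
--         n = stack.pop()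
--         if n in diz and n not in seen:
--             seen.add(n)
--             ris[n] = diz[n]
--             stack.extend(reversed(diz[n]))
--     return ris
-- ===== Notes on version B (the rewrite author's own statement) =====
-- stated objective: alternative
-- what changed: B replaces A's recursion-free-of-a-visited-set re-traversal (while-loop re-entry plus recursive calls per child) by an iterative explicit-stack worklist loop with a visited set, popping each reachable node once.
import Mathlib
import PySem

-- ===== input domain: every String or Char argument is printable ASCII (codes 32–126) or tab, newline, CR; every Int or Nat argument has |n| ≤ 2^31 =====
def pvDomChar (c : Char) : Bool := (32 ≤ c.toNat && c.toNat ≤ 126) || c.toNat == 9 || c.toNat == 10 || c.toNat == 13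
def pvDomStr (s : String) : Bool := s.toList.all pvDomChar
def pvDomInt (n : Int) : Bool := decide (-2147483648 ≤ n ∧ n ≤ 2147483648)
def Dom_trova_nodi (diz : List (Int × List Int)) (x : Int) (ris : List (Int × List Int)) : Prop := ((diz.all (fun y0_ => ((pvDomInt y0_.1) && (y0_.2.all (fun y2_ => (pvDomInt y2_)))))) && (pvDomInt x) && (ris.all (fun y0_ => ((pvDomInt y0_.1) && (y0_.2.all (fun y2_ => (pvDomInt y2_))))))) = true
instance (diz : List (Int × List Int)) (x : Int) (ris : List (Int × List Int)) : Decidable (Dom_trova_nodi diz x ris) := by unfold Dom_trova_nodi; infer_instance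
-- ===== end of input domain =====

-- B replaces A's repeated re-traversal of child subtrees (while-loop re-entry + recursion without
-- a visited set) by an iterative explicit-stack worklist loop with a `seen` set, popping each
-- reachable node once; both A and B mutate `ris` in place in Python, performing the same updates
-- (equivalence proved on the return value, which is the same object).
-- ===== PORT A =====
-- helpers for A's fuel (totality guard only: node universe of the dict)
def pvU (d : PySem.Dict Int (List Int)) : Finset Int :=
  d.items.foldr (fun p s => insert p.1 (p.2.foldr insert s)) ∅

def pvFuel (diz : List (Int × List Int)) (x : Int) : Nat :=
  (insert x (pvU (PySem.Dict.mk diz))).card + 1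

-- literal fueled transliteration of A's while/for/recursion (fuel = totality guard only;
-- the for-loop is the foldlM over the same children list, threading the same ris)
def pvTnA : Nat → PySem.Dict Int (List Int) → Int → PySem.Dict Int (List Int) → Option (PySem.Dict Int (List Int))
  | 0, _, _, _ => none
  | f+1, d, x, ris =>
    match PySem.Dict.get? d x with
    | none => some ris                                   -- while x in diz.keys(): false → return ris
    | some cs =>
      let ris1 := PySem.Dict.insert ris x cs             -- ris[x] = diz[x]
      if cs = [] then some ris1                          -- if ris[x] == []: break
      else
        match cs.foldlM (fun r c => pvTnA f d c r) ris1 with  -- for el in ris[x]: x = el; ris = trova_nodi(diz,x,ris)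
        | none => none
        | some ris2 => pvTnA f d (cs.getLastD 0) ris2    -- while re-checks with x = last el

def trova_nodi (diz : List (Int × List Int)) (x : Int) (ris : List (Int × List Int)) : List (Int × List Int) :=
  match pvTnA (pvFuel diz x) (PySem.Dict.mk diz) x (PySem.Dict.mk ris) with
  | some r => r.items
  | none => ris                                          -- fuel exhausted (A does not terminate there)

-- ===== PORT B =====
-- B's fuel (totality guard only): one pop per stack element ever pushed, ≤ 1 + Σ|children| + 1
def pvFuelI (diz : List (Int × List Int)) : Nat :=
  (diz.map (fun p => p.2.length)).sum + 2

-- literal fueled transliteration of B's while-loop over the explicit stack (head of the Lean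
-- list = top of the Python stack, so `stack.pop()` is the head and `stack.extend(reversed(diz[n]))`
-- prepends the children in order: cs ++ stack)
def pvVisI : Nat → PySem.Dict Int (List Int) → List Int → PySem.Set Int → PySem.Dict Int (List Int) → Option (PySem.Dict Int (List Int))
  | 0, _, _, _, _ => none
  | _+1, _, [], _, ris => some ris                       -- while stack: false → return ris
  | f+1, d, n :: stack, seen, ris =>                     -- n = stack.pop()
    match PySem.Dict.get? d n with
    | none => pvVisI f d stack seen ris                  -- n not in diz: loop on
    | some cs =>
      if PySem.Set.contains seen n then
        pvVisI f d stack seen ris                        -- n in seen: loop on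
      else                                               -- seen.add(n); ris[n] = diz[n]; stack.extend(reversed(diz[n]))
        pvVisI f d (cs ++ stack) (PySem.Set.add seen n) (PySem.Dict.insert ris n cs)

def trova_nodi_alt (diz : List (Int × List Int)) (x : Int) (ris : List (Int × List Int)) : List (Int × List Int) :=
  match pvVisI (pvFuelI diz) (PySem.Dict.mk diz) [x] [] (PySem.Dict.mk ris) with
  | some r => r.items
  | none => ris                                          -- fuel exhausted (unreachable under Pre_)

-- ===== PRECONDITION & SPEC =====
-- Bounded reachability closure: a closed-form graph property of the input (not a re-run of either port).
def pvKids (d : PySem.Dict Int (List Int)) (k : Int) : List Int := (PySem.Dict.get? d k).getD []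
def pvStep (d : PySem.Dict Int (List Int)) (S : Finset Int) : Finset Int :=
  S ∪ S.biUnion (fun k => (pvKids d k).toFinset)
def pvClose (d : PySem.Dict Int (List Int)) : Nat → Finset Int → Finset Int
  | 0, S => S
  | n+1, S => pvClose d n (pvStep d S)
def pvCL (d : PySem.Dict Int (List Int)) (seed : Finset Int) : Finset Int :=
  pvClose d ((seed ∪ pvU d).card + 1) seed
def pvRS (d : PySem.Dict Int (List Int)) (x : Int) : Finset Int := pvCL d {x}
def pvRFK (d : PySem.Dict Int (List Int)) (k : Int) : Finset Int := pvCL d (pvKids d k).toFinset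

-- Pre_ excludes (a) association lists with duplicate keys, which no Python dict can be, and
-- (b) inputs whose part of the graph reachable from x contains a cycle, on which A recurses
-- forever (RecursionError).
def Pre_trova_nodi (diz : List (Int × List Int)) (x : Int) (ris : List (Int × List Int)) : Prop :=
  (PySem.Dict.mk diz).keys.Nodup ∧ (PySem.Dict.mk ris).keys.Nodup ∧
    ∀ k ∈ pvRS (PySem.Dict.mk diz) x, k ∉ pvRFK (PySem.Dict.mk diz) k
instance (diz : List (Int × List Int)) (x : Int) (ris : List (Int × List Int)) : Decidable (Pre_trova_nodi diz x ris) := by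
  unfold Pre_trova_nodi; infer_instance

def pvWitness_trova_nodi : (List (Int × List Int)) × Int × (List (Int × List Int)) :=
  ([(1, [2, 3]), (2, []), (4, [1])], 1, [(5, [6])])

def Spec_trova_nodi (diz : List (Int × List Int)) (x : Int) (ris : List (Int × List Int)) (out : List (Int × List Int)) : Prop := out = trova_nodi_alt diz x ris
instance (diz : List (Int × List Int)) (x : Int) (ris : List (Int × List Int)) (out : List (Int × List Int)) : Decidable (Spec_trova_nodi diz x ris out) := by unfold Spec_trova_nodi; infer_instance

-- ===== CLAIM (what is proved, stated in full; the proofs are below) =====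
def Claim_equal_trova_nodi : Prop := ∀ (diz : List (Int × List Int)) (x : Int) (ris : List (Int × List Int)), Dom_trova_nodi diz x ris → Pre_trova_nodi diz x ris → Spec_trova_nodi diz x ris (trova_nodi diz x ris)
-- ===== LEMMAS AND PROOFS =====
-- Proof-only reference program: the recursive DFS with a visited set. A is proved equal to it
-- (pvMain), and B's worklist loop is proved to simulate it (pvBridge); neither port uses it.
def pvVisB : Nat → PySem.Dict Int (List Int) → Int → PySem.Set Int → PySem.Dict Int (List Int) → Option (PySem.Set Int × PySem.Dict Int (List Int))
  | 0, _, _, _, _ => none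
  | f+1, d, n, seen, ris =>
    match PySem.Dict.get? d n with
    | none => some (seen, ris)
    | some cs =>
      if PySem.Set.contains seen n then some (seen, ris)
      else
        cs.foldlM (fun p c => pvVisB f d c p.1 p.2) (PySem.Set.add seen n, PySem.Dict.insert ris n cs)

-- graph universe
theorem pvMem_foldr_insert (l : List Int) (S : Finset Int) (a : Int) :
    a ∈ l.foldr insert S ↔ a ∈ l ∨ a ∈ S := by
  induction l with
  | nil => simp
  | cons b r ih => simp [ih]; tauto

theorem pvGet?_mem_U (l : List (Int × List Int)) (k : Int) (cs : List Int)
    (h : (PySem.Dict.mk l).get? k = some cs) : ∀ c ∈ cs, c ∈ pvU (PySem.Dict.mk l) := by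
  induction l with
  | nil => simp [PySem.Dict.get?] at h
  | cons p r ih =>
    rw [PySem.Dict.get?_mk_cons] at h
    have hU : pvU (PySem.Dict.mk (p :: r)) = insert p.1 (p.2.foldr insert (pvU (PySem.Dict.mk r))) := rfl
    by_cases hpk : (p.1 == k) = true
    · simp [hpk] at h
      intro c hc
      rw [hU, Finset.mem_insert, pvMem_foldr_insert]
      exact Or.inr (Or.inl (h ▸ hc))
    · simp [hpk] at h
      intro c hc
      rw [hU, Finset.mem_insert, pvMem_foldr_insert]
      exact Or.inr (Or.inr (ih h c hc))

theorem pvKids_subset_U (d : PySem.Dict Int (List Int)) (k : Int) :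
    ∀ c ∈ pvKids d k, c ∈ pvU d := by
  obtain ⟨l⟩ := d
  unfold pvKids
  cases h : (PySem.Dict.mk l).get? k with
  | none => simp
  | some cs => simpa using pvGet?_mem_U l k cs h

def pvClosed (d : PySem.Dict Int (List Int)) (T : Finset Int) : Prop :=
  ∀ k ∈ T, ∀ c ∈ pvKids d k, c ∈ T

theorem pvSubset_step (d : PySem.Dict Int (List Int)) (S : Finset Int) : S ⊆ pvStep d S :=
  Finset.subset_union_left

theorem pvStep_subset_closed (d : PySem.Dict Int (List Int)) {S T : Finset Int}
    (h : S ⊆ T) (hc : pvClosed d T) : pvStep d S ⊆ T := by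
  unfold pvStep
  apply Finset.union_subset h
  intro c hc'
  rcases Finset.mem_biUnion.mp hc' with ⟨k, hk, hck⟩
  exact hc k (h hk) c (by simpa using hck)

theorem pvClose_succ (d : PySem.Dict Int (List Int)) (n : Nat) (S : Finset Int) :
    pvClose d (n+1) S = pvStep d (pvClose d n S) := by
  induction n generalizing S with
  | zero => rfl
  | succ m ih => show pvClose d (m+1) (pvStep d S) = _; rw [ih]; rfl

theorem pvSubset_close (d : PySem.Dict Int (List Int)) (n : Nat) (S : Finset Int) :
    S ⊆ pvClose d n S := by
  induction n generalizing S with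
  | zero => exact fun _ h => h
  | succ m ih =>
    intro a ha
    show a ∈ pvClose d m (pvStep d S)
    exact ih (pvStep d S) (pvSubset_step d S ha)

theorem pvClose_le_succ (d : PySem.Dict Int (List Int)) (n : Nat) (S : Finset Int) :
    pvClose d n S ⊆ pvClose d (n+1) S := by
  rw [pvClose_succ]; exact pvSubset_step d _

theorem pvClose_subset_closed (d : PySem.Dict Int (List Int)) (n : Nat) {S T : Finset Int}
    (h : S ⊆ T) (hc : pvClosed d T) : pvClose d n S ⊆ T := by
  induction n generalizing S with
  | zero => exact h
  | succ m ih => exact ih (pvStep_subset_closed d h hc)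

theorem pvClose_fix (d : PySem.Dict Int (List Int)) (n : Nat) (S : Finset Int)
    (h : pvClose d (n+1) S = pvClose d n S) :
    ∀ m, n ≤ m → pvClose d m S = pvClose d n S := by
  intro m hm
  induction m with
  | zero => simp_all
  | succ k ih =>
    rcases Nat.lt_or_ge n (k+1) with hlt | hge
    · have hk : n ≤ k := by omega
      rw [pvClose_succ, ih hk, ← pvClose_succ, h]
    · have hnk : n = k + 1 := le_antisymm hm hge
      rw [hnk]
theorem pvClose_card (d : PySem.Dict Int (List Int)) (S : Finset Int) :
    ∀ n, (∀ m < n, pvClose d (m+1) S ≠ pvClose d m S) → n ≤ (pvClose d n S).card := by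
  intro n
  induction n with
  | zero => intro _; exact Nat.zero_le _
  | succ k ih =>
    intro h
    have hk : k ≤ (pvClose d k S).card := ih (fun m hm => h m (by omega))
    have hne : pvClose d (k+1) S ≠ pvClose d k S := h k (by omega)
    have hss : pvClose d k S ⊂ pvClose d (k+1) S :=
      Finset.ssubset_iff_subset_ne.mpr ⟨pvClose_le_succ d k S, fun he => hne he.symm⟩
    have := Finset.card_lt_card hss
    omega

theorem pvClosed_union_U (d : PySem.Dict Int (List Int)) (S : Finset Int) :
    pvClosed d (S ∪ pvU d) := by
  intro k _ c hc
  exact Finset.mem_union_right _ (pvKids_subset_U d k c hc)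

theorem pvClosed_of_step_eq (d : PySem.Dict Int (List Int)) {T : Finset Int}
    (h : pvStep d T = T) : pvClosed d T := by
  intro k hk c hc
  rw [← h]
  exact Finset.mem_union_right _ (Finset.mem_biUnion.mpr ⟨k, hk, by simpa using hc⟩)

theorem pvCL_closed (d : PySem.Dict Int (List Int)) (S : Finset Int) : pvClosed d (pvCL d S) := by
  set N := (S ∪ pvU d).card + 1 with hN
  have hfix : ∃ m < N, pvClose d (m+1) S = pvClose d m S := by
    by_contra hno
    push Not at hno
    have := pvClose_card d S N (fun m hm => hno m hm)
    have hsub : pvClose d N S ⊆ S ∪ pvU d :=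
      pvClose_subset_closed d N Finset.subset_union_left (pvClosed_union_U d S)
    have := Finset.card_le_card hsub
    omega
  rcases hfix with ⟨m, hm, hfx⟩
  have h1 : pvClose d N S = pvClose d m S := pvClose_fix d m S hfx N (by omega)
  have h2 : pvClose d (N+1) S = pvClose d m S := pvClose_fix d m S hfx (N+1) (by omega)
  apply pvClosed_of_step_eq d
  show pvStep d (pvCL d S) = pvCL d S
  have : pvCL d S = pvClose d N S := rfl
  rw [this, ← pvClose_succ, h1, h2]

theorem pvSubset_CL (d : PySem.Dict Int (List Int)) (S : Finset Int) : S ⊆ pvCL d S :=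
  pvSubset_close d _ S

theorem pvCL_min (d : PySem.Dict Int (List Int)) {S T : Finset Int}
    (h : S ⊆ T) (hc : pvClosed d T) : pvCL d S ⊆ T :=
  pvClose_subset_closed d _ h hc

theorem pvMem_RS_self (d : PySem.Dict Int (List Int)) (x : Int) : x ∈ pvRS d x :=
  pvSubset_CL d {x} (Finset.mem_singleton_self x)

theorem pvRS_closed (d : PySem.Dict Int (List Int)) (x : Int) : pvClosed d (pvRS d x) :=
  pvCL_closed d {x}

theorem pvKids_subset_RS (d : PySem.Dict Int (List Int)) {x k : Int} (hk : k ∈ pvRS d x) :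
    ∀ c ∈ pvKids d k, c ∈ pvRS d x :=
  pvRS_closed d x k hk

theorem pvRS_subset (d : PySem.Dict Int (List Int)) {x c : Int} (hc : c ∈ pvRS d x) :
    pvRS d c ⊆ pvRS d x :=
  pvCL_min d (by simpa using hc) (pvRS_closed d x)

theorem pvRS_child_subset_RFK (d : PySem.Dict Int (List Int)) {x c : Int} (hc : c ∈ pvKids d x) :
    pvRS d c ⊆ pvRFK d x := by
  apply pvCL_min d _ (pvCL_closed d _)
  simpa using pvSubset_CL d (pvKids d x).toFinset (by simpa using hc)

def pvAcyc (d : PySem.Dict Int (List Int)) (x : Int) : Prop :=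
  ∀ k ∈ pvRS d x, k ∉ pvRFK d k

theorem pvAcyc_mem (d : PySem.Dict Int (List Int)) {x c : Int} (h : pvAcyc d x)
    (hc : c ∈ pvRS d x) : pvAcyc d c :=
  fun k hk => h k (pvRS_subset d hc hk)

theorem pvNot_mem_RS_child (d : PySem.Dict Int (List Int)) {x c : Int} (h : pvAcyc d x)
    (hc : c ∈ pvKids d x) : x ∉ pvRS d c :=
  fun hx => h x (pvMem_RS_self d x) (pvRS_child_subset_RFK d hc hx)

theorem pvMem_RS_of_kid (d : PySem.Dict Int (List Int)) {x c : Int} (hc : c ∈ pvKids d x) :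
    c ∈ pvRS d x :=
  pvKids_subset_RS d (pvMem_RS_self d x) c hc

theorem pvCard_lt (d : PySem.Dict Int (List Int)) {x c : Int} (h : pvAcyc d x)
    (hc : c ∈ pvKids d x) : (pvRS d c).card < (pvRS d x).card := by
  apply Finset.card_lt_card
  refine Finset.ssubset_iff_of_subset (pvRS_subset d (pvMem_RS_of_kid d hc)) |>.mpr ?_
  exact ⟨x, pvMem_RS_self d x, pvNot_mem_RS_child d h hc⟩

theorem pvRS_decomp (d : PySem.Dict Int (List Int)) {x k : Int} (hk : k ∈ pvRS d x) :
    k = x ∨ ∃ c ∈ pvKids d x, k ∈ pvRS d c := by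
  have hsub : pvRS d x ⊆ insert x ((pvKids d x).toFinset.biUnion (fun c => pvRS d c)) := by
    apply pvCL_min d
    · simp
    · intro j hj c hc
      rcases Finset.mem_insert.mp hj with hjx | hjb
      · subst hjx
        exact Finset.mem_insert_of_mem (Finset.mem_biUnion.mpr ⟨c, by simpa using hc, pvMem_RS_self d c⟩)
      · rcases Finset.mem_biUnion.mp hjb with ⟨c', hc', hjc'⟩
        exact Finset.mem_insert_of_mem (Finset.mem_biUnion.mpr ⟨c', hc', pvKids_subset_RS d hjc' c hc⟩)
  rcases Finset.mem_insert.mp (hsub hk) with h1 | h2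
  · exact Or.inl h1
  · rcases Finset.mem_biUnion.mp h2 with ⟨c, hc, hkc⟩
    exact Or.inr ⟨c, by simpa using hc, hkc⟩

theorem pvRS_no_kids (d : PySem.Dict Int (List Int)) {x : Int} (h : pvKids d x = []) :
    pvRS d x = {x} := by
  apply Finset.Subset.antisymm
  · apply pvCL_min d (fun a ha => ha)
    intro k hk c hc
    rcases Finset.mem_singleton.mp hk with rfl
    rw [h] at hc
    simp at hc
  · simpa using pvMem_RS_self d x

theorem pvRS_card_pos (d : PySem.Dict Int (List Int)) (x : Int) : 0 < (pvRS d x).card :=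
  Finset.card_pos.mpr ⟨x, pvMem_RS_self d x⟩
-- dict-side lemmas
theorem pvInsert_noop (d : PySem.Dict Int (List Int)) (k : Int) (v : List Int)
    (hnd : d.keys.Nodup) (h : d.get? k = some v) : d.insert k v = d := by
  have hcon : d.contains k = true := by
    rw [PySem.Dict.contains_eq_isSome_get?, h]; rfl
  apply PySem.Dict.ext
  rw [PySem.Dict.items_insert_of_contains _ _ hcon]
  conv_rhs => rw [← List.map_id d.items]
  apply List.map_congr_left
  intro p hp
  by_cases hpk : (p.1 == k) = true
  · have hk : p.1 = k := by simpa using hpk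
    have hmem : (k, p.2) ∈ d.items := by rw [← hk]; exact hp
    have := PySem.Dict.get?_of_mem_items _ hmem hnd
    rw [h] at this
    have hv : p.2 = v := by simpa using this.symm
    simp [← hk, ← hv]
  · simp [hpk]

theorem pvGetLastD_mem (cs : List Int) (a : Int) (h : cs ≠ []) : cs.getLastD a ∈ cs := by
  induction cs with
  | nil => simp at h
  | cons b r ih =>
    cases r with
    | nil => simp
    | cons c r' => simpa using Or.inr (ih (by simp))

-- "evolves by correct insertions only": every entry is unchanged or set to its diz value
def pvExt (d r r' : PySem.Dict Int (List Int)) : Prop :=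
  ∀ k, r'.get? k = r.get? k ∨ (r'.get? k = d.get? k ∧ (d.get? k).isSome)

theorem pvExt_refl (d r : PySem.Dict Int (List Int)) : pvExt d r r := fun _ => Or.inl rfl

theorem pvExt_trans {d r1 r2 r3 : PySem.Dict Int (List Int)} (h1 : pvExt d r1 r2)
    (h2 : pvExt d r2 r3) : pvExt d r1 r3 := by
  intro k
  rcases h2 k with h | h
  · rcases h1 k with h' | h'
    · exact Or.inl (h.trans h')
    · exact Or.inr ⟨h.trans h'.1, h'.2⟩
  · exact Or.inr h

theorem pvExt_insert (d r : PySem.Dict Int (List Int)) {x : Int} {cs : List Int}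
    (h : d.get? x = some cs) : pvExt d r (r.insert x cs) := by
  intro k
  by_cases hk : k = x
  · subst hk
    exact Or.inr ⟨by rw [PySem.Dict.get?_insert_self, h], by rw [h]; rfl⟩
  · exact Or.inl (PySem.Dict.get?_insert_of_ne _ _ hk)

-- all keys of S are recorded in ris with their diz value
def pvDone (d ris : PySem.Dict Int (List Int)) (S : Finset Int) : Prop :=
  ∀ k ∈ S, ∀ cs, d.get? k = some cs → ris.get? k = some cs

theorem pvDone_ext {d r r' : PySem.Dict Int (List Int)} {S : Finset Int}
    (hd : pvDone d r S) (he : pvExt d r r') : pvDone d r' S := by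
  intro k hk cs hcs
  rcases he k with h | h
  · rw [h]; exact hd k hk cs hcs
  · rw [h.1, hcs]

theorem pvDone_subset {d r : PySem.Dict Int (List Int)} {S S' : Finset Int}
    (hs : S' ⊆ S) (hd : pvDone d r S) : pvDone d r S' :=
  fun k hk => hd k (hs hk)

theorem pvNodup_insert (r : PySem.Dict Int (List Int)) (x : Int) (cs : List Int)
    (h : r.keys.Nodup) : (r.insert x cs).keys.Nodup := PySem.Dict.nodup_keys_insert _ _ _ h
-- A's run over a subtree whose reachable keys are already correctly recorded returns ris unchanged
theorem pvAbsorb (d : PySem.Dict Int (List Int)) :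
    ∀ n x f (ris : PySem.Dict Int (List Int)),
      pvAcyc d x → (pvRS d x).card ≤ n → (pvRS d x).card ≤ f →
      ris.keys.Nodup → pvDone d ris (pvRS d x) →
      pvTnA f d x ris = some ris := by
  intro n
  induction n with
  | zero => intro x f ris _ hn _ _ _; have := pvRS_card_pos d x; omega
  | succ n ih =>
    intro x f ris hA hn hf hnd hD
    have hpos := pvRS_card_pos d x
    cases f with
    | zero => omega
    | succ f' =>
      cases h : PySem.Dict.get? d x with
      | none => simp [pvTnA, h]
      | some cs =>
        have hx : ris.get? x = some cs := hD x (pvMem_RS_self d x) cs h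
        have hins : ris.insert x cs = ris := pvInsert_noop ris x cs hnd hx
        have hkids : pvKids d x = cs := by simp [pvKids, h]
        by_cases hcs : cs = []
        · subst hcs; simp [pvTnA, h, hins]
        · have hfor : ∀ l, (∀ c ∈ l, c ∈ pvKids d x) →
              List.foldlM (fun r c => pvTnA f' d c r) ris l = some ris := by
            intro l
            induction l with
            | nil => intro _; rfl
            | cons c l' ihl =>
              intro hl
              have hcK : c ∈ pvKids d x := hl c (List.mem_cons_self)
              have hcRS : c ∈ pvRS d x := pvMem_RS_of_kid d hcK
              have hcard := pvCard_lt d hA hcK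
              have hc1 : pvTnA f' d c ris = some ris :=
                ih c f' ris (pvAcyc_mem d hA hcRS) (by omega) (by omega) hnd
                  (pvDone_subset (pvRS_subset d hcRS) hD)
              rw [List.foldlM_cons, hc1]
              exact ihl (fun a ha => hl a (List.mem_cons_of_mem _ ha))
          have hlastK : cs.getLastD 0 ∈ pvKids d x := hkids ▸ pvGetLastD_mem cs 0 hcs
          have hlRS : cs.getLastD 0 ∈ pvRS d x := pvMem_RS_of_kid d hlastK
          have hcard := pvCard_lt d hA hlastK
          have htail : pvTnA f' d (cs.getLastD 0) ris = some ris :=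
            ih _ f' ris (pvAcyc_mem d hA hlRS) (by omega) (by omega) hnd
              (pvDone_subset (pvRS_subset d hlRS) hD)
          have hforcs := hfor cs (fun c hc => hkids ▸ hc)
          simp only [pvTnA, h, hins]
          rw [if_neg hcs, hforcs]
          exact htail
-- Main lemma: under acyclicity A's fueled run and the reference DFS produce the same dict,
-- threading the `seen` set with the invariant that seen nodes inside the current subtree are fully recorded.
theorem pvMain (d : PySem.Dict Int (List Int)) :
    ∀ n x f (seen : PySem.Set Int) (ris : PySem.Dict Int (List Int)),
      pvAcyc d x → (pvRS d x).card ≤ n → (pvRS d x).card ≤ f → ris.keys.Nodup →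
      (∀ s ∈ seen, s ∈ pvRS d x → pvDone d ris (pvRS d s)) →
      ∃ seen' ris', pvVisB f d x seen ris = some (seen', ris') ∧
        pvTnA f d x ris = some ris' ∧ ris'.keys.Nodup ∧ pvExt d ris ris' ∧
        (∀ s ∈ seen, s ∈ seen') ∧
        (∀ s ∈ seen', s ∈ seen ∨ pvDone d ris' (pvRS d s)) ∧
        pvDone d ris' (pvRS d x) := by
  intro n
  induction n with
  | zero => intro x f seen ris _ hn _ _ _; have := pvRS_card_pos d x; omega
  | succ n ih =>
    intro x f seen ris hA hn hf hnd hSOK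
    have hpos := pvRS_card_pos d x
    cases f with
    | zero => omega
    | succ f' =>
      cases h : PySem.Dict.get? d x with
      | none =>
        refine ⟨seen, ris, by simp [pvVisB, h], by simp [pvTnA, h], hnd, pvExt_refl d ris,
          fun s hs => hs, fun s hs => Or.inl hs, ?_⟩
        have hRSx : pvRS d x = {x} := pvRS_no_kids d (by simp [pvKids, h])
        intro k hk cs' hcs'
        rw [hRSx] at hk
        rcases Finset.mem_singleton.mp hk with rfl
        rw [h] at hcs'; cases hcs'
      | some cs =>
        have hkids : pvKids d x = cs := by simp [pvKids, h]
        by_cases hseen : PySem.Set.contains seen x = true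
        · -- x already seen: the DFS skips, A's whole run is a no-op by absorption
          have hxmem : x ∈ seen := (PySem.Set.contains_iff seen x).mp hseen
          have hDx : pvDone d ris (pvRS d x) := hSOK x hxmem (pvMem_RS_self d x)
          refine ⟨seen, ris, by simp only [pvVisB, h]; rw [if_pos hseen], ?_, hnd, pvExt_refl d ris,
            fun s hs => hs, fun s hs => Or.inl hs, hDx⟩
          exact pvAbsorb d (pvRS d x).card x (f'+1) ris hA le_rfl hf hnd hDx
        · have hxnot : x ∉ seen := fun hx => hseen ((PySem.Set.contains_iff seen x).mpr hx)
          have hext1 : pvExt d ris (ris.insert x cs) := pvExt_insert d ris h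
          have hnd1 : (ris.insert x cs).keys.Nodup := pvNodup_insert ris x cs hnd
          by_cases hcs : cs = []
          · -- no children: both record x and stop
            subst hcs
            have hRSx : pvRS d x = {x} := pvRS_no_kids d (by simp [pvKids, h])
            refine ⟨PySem.Set.add seen x, ris.insert x [],
              by simp only [pvVisB, h]; rw [if_neg (by simpa using hseen)]; rfl,
              by simp [pvTnA, h], hnd1, hext1,
              fun s hs => (PySem.Set.mem_add _ _ _).mpr (Or.inl hs), ?_, ?_⟩
            · intro s hs
              rcases (PySem.Set.mem_add _ _ _).mp hs with hs' | rfl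
              · exact Or.inl hs'
              · refine Or.inr ?_
                rw [hRSx]
                intro k hk cs' hcs'
                rcases Finset.mem_singleton.mp hk with rfl
                rw [h] at hcs'
                cases hcs'
                rw [PySem.Dict.get?_insert_self]
            · rw [hRSx]
              intro k hk cs' hcs'
              rcases Finset.mem_singleton.mp hk with rfl
              rw [h] at hcs'
              cases hcs'
              rw [PySem.Dict.get?_insert_self]
          · -- children: run the for-loop in lockstep
            have hloop : ∀ (l : List Int), (∀ c ∈ l, c ∈ pvKids d x) →
                ∀ (seenC : PySem.Set Int) (risC : PySem.Dict Int (List Int)),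
                risC.keys.Nodup → pvExt d ris risC →
                (∀ s ∈ seenC, s ∈ seen ∨ s = x ∨ pvDone d risC (pvRS d s)) →
                ∃ seenF risF,
                  List.foldlM (fun p c => pvVisB f' d c p.1 p.2) (seenC, risC) l = some (seenF, risF) ∧
                  List.foldlM (fun r c => pvTnA f' d c r) risC l = some risF ∧
                  risF.keys.Nodup ∧ pvExt d risC risF ∧ (∀ s ∈ seenC, s ∈ seenF) ∧
                  (∀ s ∈ seenF, s ∈ seenC ∨ pvDone d risF (pvRS d s)) ∧
                  (∀ c ∈ l, pvDone d risF (pvRS d c)) := by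
              intro l
              induction l with
              | nil =>
                intro _ seenC risC hndC hextC H1
                exact ⟨seenC, risC, rfl, rfl, hndC, pvExt_refl d risC, fun s hs => hs,
                  fun s hs => Or.inl hs, by simp⟩
              | cons c l' ihl =>
                intro hl seenC risC hndC hextC H1
                have hcK : c ∈ pvKids d x := hl c List.mem_cons_self
                have hcRS : c ∈ pvRS d x := pvMem_RS_of_kid d hcK
                have hcard := pvCard_lt d hA hcK
                have hSOKc : ∀ s ∈ seenC, s ∈ pvRS d c → pvDone d risC (pvRS d s) := by
                  intro s hs hsRS
                  rcases H1 s hs with hs' | rfl | hdone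
                  · exact pvDone_ext (hSOK s hs' (pvRS_subset d hcRS hsRS)) hextC
                  · exact absurd hsRS (pvNot_mem_RS_child d hA hcK)
                  · exact hdone
                obtain ⟨seen1, ris1, hB1, hA1, hnd2, hext2, hmono2, hnew2, hdone2⟩ :=
                  ih c f' seenC risC (pvAcyc_mem d hA hcRS) (by omega) (by omega) hndC hSOKc
                obtain ⟨seenF, risF, hBF, hAF, hndF, hextF, hmonoF, hnewF, hdoneF⟩ :=
                  ihl (fun a ha => hl a (List.mem_cons_of_mem _ ha)) seen1 ris1 hnd2
                    (pvExt_trans hextC hext2)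
                    (by
                      intro s hs
                      rcases hnew2 s hs with hs' | hdone
                      · rcases H1 s hs' with h1 | h1 | h1
                        · exact Or.inl h1
                        · exact Or.inr (Or.inl h1)
                        · exact Or.inr (Or.inr (pvDone_ext h1 hext2))
                      · exact Or.inr (Or.inr hdone))
                refine ⟨seenF, risF, ?_, ?_, hndF, pvExt_trans hext2 hextF,
                  fun s hs => hmonoF s (hmono2 s hs), ?_, ?_⟩
                · rw [List.foldlM_cons, hB1]; exact hBF
                · rw [List.foldlM_cons, hA1]; exact hAF
                · intro s hs
                  rcases hnewF s hs with hs1 | hdone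
                  · rcases hnew2 s hs1 with hs' | hdone
                    · exact Or.inl hs'
                    · exact Or.inr (pvDone_ext hdone hextF)
                  · exact Or.inr hdone
                · intro a ha
                  rcases List.mem_cons.mp ha with rfl | ha'
                  · exact pvDone_ext hdone2 hextF
                  · exact hdoneF a ha'
            obtain ⟨seenF, risF, hBF, hAF, hndF, hextF, hmonoF, hnewF, hdoneF⟩ :=
              hloop cs (fun c hc => hkids ▸ hc) (PySem.Set.add seen x) (ris.insert x cs) hnd1 hext1
                (by
                  intro s hs
                  rcases (PySem.Set.mem_add _ _ _).mp hs with hs' | rfl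
                  · exact Or.inl hs'
                  · exact Or.inr (Or.inl rfl))
            -- the dict after the loop records everything reachable from x
            have hDx : pvDone d risF (pvRS d x) := by
              intro k hk cs' hcs'
              rcases pvRS_decomp d hk with rfl | ⟨c, hcK, hkc⟩
              · rw [h] at hcs'
                cases hcs'
                rcases hextF k with he | he
                · rw [he, PySem.Dict.get?_insert_self]
                · rw [he.1, h]
              · exact hdoneF c (hkids ▸ hcK) k hkc cs' hcs'
            -- A's while re-entry at the last child is a no-op by absorption
            have hlastK : cs.getLastD 0 ∈ pvKids d x := hkids ▸ pvGetLastD_mem cs 0 hcs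
            have hlRS : cs.getLastD 0 ∈ pvRS d x := pvMem_RS_of_kid d hlastK
            have hlcard := pvCard_lt d hA hlastK
            have htail : pvTnA f' d (cs.getLastD 0) risF = some risF :=
              pvAbsorb d (pvRS d (cs.getLastD 0)).card _ f' risF (pvAcyc_mem d hA hlRS)
                le_rfl (by omega) hndF (pvDone_subset (pvRS_subset d hlRS) hDx)
            refine ⟨seenF, risF, ?_, ?_, hndF, pvExt_trans hext1 hextF,
              fun s hs => hmonoF s ((PySem.Set.mem_add _ _ _).mpr (Or.inl hs)), ?_, hDx⟩
            · simp only [pvVisB, h]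
              rw [if_neg (by simpa using hseen)]
              exact hBF
            · simp only [pvTnA, h]
              rw [if_neg hcs, hAF]
              exact htail
            · intro s hs
              rcases hnewF s hs with hs1 | hdone
              · rcases (PySem.Set.mem_add _ _ _).mp hs1 with hs' | rfl
                · exact Or.inl hs'
                · exact Or.inr hDx
              · exact Or.inr hdone
theorem pvRS_card_le_fuel (diz : List (Int × List Int)) (x : Int) :
    (pvRS (PySem.Dict.mk diz) x).card ≤ pvFuel diz x := by
  have hsub : pvRS (PySem.Dict.mk diz) x ⊆ insert x (pvU (PySem.Dict.mk diz)) := by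
    apply pvCL_min
    · simp
    · intro k _ c hc
      exact Finset.mem_insert_of_mem (pvKids_subset_U _ k c hc)
  have := Finset.card_le_card hsub
  unfold pvFuel
  omega

-- ===== bridge: the worklist loop simulates the reference DFS =====
-- fuel monotonicity of the worklist loop
theorem pvVisI_mono (d : PySem.Dict Int (List Int)) :
    ∀ f f' stack seen ris r, pvVisI f d stack seen ris = some r → f ≤ f' →
      pvVisI f' d stack seen ris = some r := by
  intro f
  induction f with
  | zero => intro f' stack seen ris r h; cases h
  | succ g ih =>
    intro f' stack seen ris r h hle
    cases f' with
    | zero => omega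
    | succ g' =>
      cases stack with
      | nil => simpa using h
      | cons n rest =>
        cases hd : PySem.Dict.get? d n with
        | none =>
          simp only [pvVisI, hd] at h ⊢
          exact ih g' rest seen ris r h (by omega)
        | some cs =>
          by_cases hs : PySem.Set.contains seen n = true
          · simp only [pvVisI, hd, if_pos hs] at h ⊢
            exact ih g' rest seen ris r h (by omega)
          · simp only [pvVisI, hd, if_neg hs] at h ⊢
            exact ih g' _ _ _ r h (by omega)

-- the DFS on one node = a fixed number of worklist pops, independently of the rest of the stack
theorem pvBridge (d : PySem.Dict Int (List Int)) :
    ∀ g n seen ris seen' ris',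
      pvVisB g d n seen ris = some (seen', ris') →
      ∃ k, ∀ stack f, pvVisI (f + k) d (n :: stack) seen ris = pvVisI f d stack seen' ris' := by
  intro g
  induction g with
  | zero => intro n seen ris seen' ris' h; cases h
  | succ g ih =>
    intro n seen ris seen' ris' h
    cases hd : PySem.Dict.get? d n with
    | none =>
      simp only [pvVisB, hd, Option.some.injEq, Prod.mk.injEq] at h
      obtain ⟨rfl, rfl⟩ := h
      exact ⟨1, fun stack f => by simp only [pvVisI, hd]⟩
    | some cs =>
      by_cases hs : PySem.Set.contains seen n = true
      · simp only [pvVisB, hd, if_pos hs, Option.some.injEq, Prod.mk.injEq] at h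
        obtain ⟨rfl, rfl⟩ := h
        exact ⟨1, fun stack f => by simp only [pvVisI, hd, if_pos hs]⟩
      · simp only [pvVisB, hd, if_neg hs] at h
        -- the for-loop over the children = processing the children prefix of the stack
        have hloop : ∀ (l : List Int) (s0 : PySem.Set Int) (r0 : PySem.Dict Int (List Int))
            (s1 : PySem.Set Int) (r1 : PySem.Dict Int (List Int)),
            l.foldlM (fun p c => pvVisB g d c p.1 p.2) (s0, r0) = some (s1, r1) →
            ∃ k, ∀ stack f, pvVisI (f + k) d (l ++ stack) s0 r0 = pvVisI f d stack s1 r1 := by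
          intro l
          induction l with
          | nil =>
            intro s0 r0 s1 r1 hf
            simp only [List.foldlM_nil] at hf
            cases hf
            exact ⟨0, fun stack f => rfl⟩
          | cons c l' ihl =>
            intro s0 r0 s1 r1 hf
            rw [List.foldlM_cons] at hf
            cases hc : pvVisB g d c s0 r0 with
            | none => rw [hc] at hf; cases hf
            | some p =>
              rw [hc] at hf
              obtain ⟨sm, rm⟩ := p
              obtain ⟨kc, hkc⟩ := ih c s0 r0 sm rm hc
              obtain ⟨kl, hkl⟩ := ihl sm rm s1 r1 hf
              refine ⟨kc + kl, fun stack f => ?_⟩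
              have e1 : f + (kc + kl) = (f + kl) + kc := by omega
              calc pvVisI (f + (kc + kl)) d (c :: (l' ++ stack)) s0 r0
                  = pvVisI ((f + kl) + kc) d (c :: (l' ++ stack)) s0 r0 := by rw [e1]
                _ = pvVisI (f + kl) d (l' ++ stack) sm rm := hkc (l' ++ stack) (f + kl)
                _ = pvVisI f d stack s1 r1 := hkl stack f
        obtain ⟨k, hk⟩ := hloop cs _ _ seen' ris' h
        refine ⟨k + 1, fun stack f => ?_⟩
        have e1 : f + (k + 1) = (f + k) + 1 := by omega
        rw [e1]
        simp only [pvVisI, hd, if_neg hs]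
        exact hk stack f

-- ===== termination of the worklist loop (potential argument) =====
def pvPhi (d : PySem.Dict Int (List Int)) (stack : List Int) (seen : PySem.Set Int) : Nat :=
  stack.length + ∑ k ∈ d.keys.toFinset \ seen.toFinset, (pvKids d k).length

theorem pvVisI_total (d : PySem.Dict Int (List Int)) :
    ∀ f stack seen ris, pvPhi d stack seen < f →
      ∃ r, pvVisI f d stack seen ris = some r := by
  intro f
  induction f with
  | zero => intro stack seen ris h; omega
  | succ g ih =>
    intro stack seen ris h
    cases stack with
    | nil => exact ⟨ris, rfl⟩
    | cons n rest =>
      cases hd : PySem.Dict.get? d n with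
      | none =>
        simp only [pvVisI, hd]
        apply ih
        have : pvPhi d rest seen + 1 = pvPhi d (n :: rest) seen := by
          simp [pvPhi, List.length_cons]; omega
        omega
      | some cs =>
        by_cases hs : PySem.Set.contains seen n = true
        · simp only [pvVisI, hd, if_pos hs]
          apply ih
          have : pvPhi d rest seen + 1 = pvPhi d (n :: rest) seen := by
            simp [pvPhi, List.length_cons]; omega
          omega
        · simp only [pvVisI, hd, if_neg hs]
          apply ih
          -- expanding n removes its children-count from the potential's sum
          have hnk : n ∈ d.keys.toFinset := by
            rw [List.mem_toFinset, ← PySem.Dict.contains_iff_mem_keys,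
              PySem.Dict.contains_eq_isSome_get?, hd]
            rfl
          have hnseen : n ∉ seen.toFinset := by
            rw [List.mem_toFinset]
            exact fun hx => hs ((PySem.Set.contains_iff seen n).mpr hx)
          have hadd : (PySem.Set.add seen n).toFinset = insert n seen.toFinset := by
            ext a
            simp [List.mem_toFinset, PySem.Set.mem_add]
            tauto
          have hsd : d.keys.toFinset \ (insert n seen.toFinset)
              = (d.keys.toFinset \ seen.toFinset).erase n := by
            ext a
            simp [Finset.mem_sdiff, Finset.mem_erase]
            tauto
          have hnmem : n ∈ d.keys.toFinset \ seen.toFinset := Finset.mem_sdiff.mpr ⟨hnk, hnseen⟩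
          have hsum : ∑ k ∈ (d.keys.toFinset \ seen.toFinset).erase n, (pvKids d k).length
                + (pvKids d n).length
              = ∑ k ∈ d.keys.toFinset \ seen.toFinset, (pvKids d k).length :=
            Finset.sum_erase_add _ _ hnmem
          have hkn : (pvKids d n).length = cs.length := by simp [pvKids, hd]
          have : pvPhi d (cs ++ rest) (PySem.Set.add seen n) + 1 = pvPhi d (n :: rest) seen := by
            simp only [pvPhi, List.length_append, List.length_cons, hadd, hsd]
            omega
          omega

-- initial potential bound: with Nodup keys the per-key children sum is the list sum
theorem pvSum_kids_le (diz : List (Int × List Int)) (h : (PySem.Dict.mk diz).keys.Nodup) :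
    ∑ k ∈ (PySem.Dict.mk diz).keys.toFinset, (pvKids (PySem.Dict.mk diz) k).length
      ≤ (diz.map (fun p => p.2.length)).sum := by
  induction diz with
  | nil => simp [PySem.Dict.keys]
  | cons p l ihl =>
    obtain ⟨a, v⟩ := p
    have hkeys : (PySem.Dict.mk ((a, v) :: l)).keys = a :: (PySem.Dict.mk l).keys := by
      simp [PySem.Dict.keys]
    rw [hkeys] at h
    obtain ⟨hnm, hnd⟩ := List.nodup_cons.mp h
    have hnmF : a ∉ (PySem.Dict.mk l).keys.toFinset := by
      rw [List.mem_toFinset]; exact hnm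
    have hins : (PySem.Dict.mk ((a, v) :: l)).keys.toFinset
        = insert a (PySem.Dict.mk l).keys.toFinset := by
      rw [hkeys]; simp
    rw [hins, Finset.sum_insert hnmF]
    have hself : pvKids (PySem.Dict.mk ((a, v) :: l)) a = v := by
      simp [pvKids, PySem.Dict.get?_mk_cons]
    have hcong : ∑ k ∈ (PySem.Dict.mk l).keys.toFinset, (pvKids (PySem.Dict.mk ((a, v) :: l)) k).length
        = ∑ k ∈ (PySem.Dict.mk l).keys.toFinset, (pvKids (PySem.Dict.mk l) k).length := by
      apply Finset.sum_congr rfl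
      intro k hk
      have hkne : (a == k) = false := by
        simp only [beq_eq_false_iff_ne]
        intro he
        exact hnm (he ▸ List.mem_toFinset.mp hk)
      simp [pvKids, PySem.Dict.get?_mk_cons, hkne]
    rw [hself, hcong]
    have := ihl hnd
    simp only [List.map_cons, List.sum_cons]
    omega

-- ===== VERDICT (by name: the statement is the Claim_ definition above) =====
theorem trova_nodi_spec : Claim_equal_trova_nodi := by
  intro diz x ris hDom hPre
  obtain ⟨hndD, hndR, hAcyc⟩ := hPre
  obtain ⟨seen', ris', hB, hA, -⟩ :=
    pvMain (PySem.Dict.mk diz) (pvRS (PySem.Dict.mk diz) x).card x (pvFuel diz x) []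
      (PySem.Dict.mk ris) hAcyc le_rfl (pvRS_card_le_fuel diz x) hndR (by simp)
  obtain ⟨k, hk⟩ := pvBridge (PySem.Dict.mk diz) (pvFuel diz x) x [] (PySem.Dict.mk ris) seen' ris' hB
  have hkI : pvVisI (1 + k) (PySem.Dict.mk diz) [x] [] (PySem.Dict.mk ris) = some ris' := by
    have := hk [] 1
    simpa [pvVisI] using this
  have hPhi : pvPhi (PySem.Dict.mk diz) [x] [] < pvFuelI diz := by
    have hle := pvSum_kids_le diz hndD
    simp only [pvPhi, pvFuelI, List.length_singleton]
    simp only [List.toFinset_nil, Finset.sdiff_empty]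
    omega
  obtain ⟨r, hT⟩ := pvVisI_total (PySem.Dict.mk diz) (pvFuelI diz) [x] [] (PySem.Dict.mk ris) hPhi
  have hIF : pvVisI (pvFuelI diz) (PySem.Dict.mk diz) [x] [] (PySem.Dict.mk ris) = some ris' := by
    rcases Nat.le_total (1 + k) (pvFuelI diz) with hle | hle
    · exact pvVisI_mono _ _ _ _ _ _ _ hkI hle
    · have := pvVisI_mono _ _ _ _ _ _ _ hT hle
      rw [this] at hkI
      rw [hT]
      exact hkI
  show trova_nodi diz x ris = trova_nodi_alt diz x ris
  unfold trova_nodi trova_nodi_alt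
  rw [hA, hIF]
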